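-- pv_equiv track=rewrite | github.com/husinassegaff/binary-search-solutions | Easy/ConsecutiveOnes/ConsecutiveOnes.py | solve
-- ===== SOURCE A (Python) =====
-- def solve(nums):
--     check = 0
--     for i in range(len(nums)):
--         if nums[i] == 1 and check == 0:
--             check += 1
--             continue
--
--         if nums[i-1] != 1 and nums[i] == 1 and check > 0:
--             return False
--
--     return True
-- ===== SOURCE B (Python) =====
-- def solve(nums):
--     ones = nums.count(1)
--     if ones == 0:
--         return True
--     first = nums.index(1)
--     return all(x == 1 for x in nums[first:first + ones])
-- ===== Notes on version B (the rewrite author's own statement) =====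
-- stated objective: simpler
-- what changed: A's single-pass loop with a seen-a-1 counter and a look-back at nums[i-1] is replaced by a count/index/slice decomposition: count the 1s, find the first 1, and check that the count-length window starting there is all 1s.
import Mathlib
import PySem

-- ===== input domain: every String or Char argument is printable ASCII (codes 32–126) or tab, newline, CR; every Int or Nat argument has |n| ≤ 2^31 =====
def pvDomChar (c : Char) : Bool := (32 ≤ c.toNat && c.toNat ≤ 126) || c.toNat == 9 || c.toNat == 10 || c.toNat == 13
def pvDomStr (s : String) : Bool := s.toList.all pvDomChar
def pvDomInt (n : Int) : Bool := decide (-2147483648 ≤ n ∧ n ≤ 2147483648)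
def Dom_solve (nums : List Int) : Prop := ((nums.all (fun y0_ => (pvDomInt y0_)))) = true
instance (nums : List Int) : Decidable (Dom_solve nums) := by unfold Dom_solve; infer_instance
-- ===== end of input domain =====

-- B replaces A's index loop with look-back by a count/index/slice decomposition (objective: simpler).

-- ===== PORT A =====
-- the for-loop over range(len(nums)) with early 'return False'; state = remaining indices, check
def solveLoop (nums : List Int) : List Int → Int → Bool
  | [], _ => true
  | i :: rest, check =>
    if PySem.List.pyGet? nums i = some 1 ∧ check = 0 then
      solveLoop nums rest (check + 1)
    else if PySem.List.pyGet? nums (i - 1) ≠ some 1 ∧ PySem.List.pyGet? nums i = some 1 ∧ check > 0 then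
      false
    else
      solveLoop nums rest check

def solve (nums : List Int) : Bool :=
  solveLoop nums (PySem.List.pyRange 0 nums.length 1) 0

-- ===== PORT B =====
def solve_alt (nums : List Int) : Bool :=
  let ones := PySem.List.count nums 1
  if ones = 0 then true
  else
    match PySem.List.index? nums 1 with
    | none => true   -- unreachable: ones ≠ 0 means 1 ∈ nums (Python's .index cannot raise here)
    | some first =>
      (PySem.List.slice nums (some (first : Int)) (some ((first : Int) + (ones : Int)))).all
        (fun x => x == 1)

-- ===== PRECONDITION & SPEC =====
def Spec_solve (nums : List Int) (out : Bool) : Prop := out = solve_alt nums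
instance (nums : List Int) (out : Bool) : Decidable (Spec_solve nums out) := by unfold Spec_solve; infer_instance

-- ===== CLAIM (what is proved, stated in full; the proofs are below) =====
def Claim_equal_solve : Prop := ∀ (nums : List Int), Dom_solve nums → Spec_solve nums (solve nums)

-- ===== LEMMAS AND PROOFS =====

-- three-state spec: before any 1 / inside the run of 1s / after the run
def stC : List Int → Bool
  | [] => true
  | x :: xs => if x = 1 then false else stC xs

def stB : List Int → Bool
  | [] => true
  | x :: xs => if x = 1 then stB xs else stC xs

def stA : List Int → Bool
  | [] => true
  | x :: xs => if x = 1 then stB xs else stA xs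

-- A's check>0 phase, with the previous element tracked
def aux : Int → List Int → Bool
  | _, [] => true
  | p, x :: xs => if p ≠ 1 ∧ x = 1 then false else aux x xs

theorem aux_one (l : List Int) : aux 1 l = stB l := by
  induction l with
  | nil => rfl
  | cons x xs ih =>
    by_cases hx : x = 1
    · subst hx; simp [aux, stB, ih]
    · simp [aux, stB, hx]
      clear ih
      induction xs generalizing x with
      | nil => rfl
      | cons y ys ih2 =>
        by_cases hy : y = 1
        · simp [aux, stC, hx, hy]
        · simp [aux, stC, hx, hy, ih2 y hy]

theorem stC_of_not_mem (l : List Int) (h : (1:Int) ∉ l) : stC l = true := by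
  induction l with
  | nil => rfl
  | cons x xs ih =>
    simp at h
    have hx : ¬ x = 1 := fun hx => h.1 hx.symm
    simp [stC, hx, ih h.2]

theorem stC_of_mem (l : List Int) (h : (1:Int) ∈ l) : stC l = false := by
  induction l with
  | nil => simp at h
  | cons x xs ih =>
    by_cases hx : x = 1
    · simp [stC, hx]
    · simp [stC, hx]
      rcases List.mem_cons.mp h with h1 | h2
      · exact absurd h1.symm hx
      · exact ih h2

theorem stA_of_not_mem (l : List Int) (h : (1:Int) ∉ l) : stA l = true := by
  induction l with
  | nil => rfl
  | cons x xs ih =>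
    simp at h
    have hx : ¬ x = 1 := fun hx => h.1 hx.symm
    simp [stA, hx, ih h.2]

theorem stA_append_of_not_mem (pre l : List Int) (h : (1:Int) ∉ pre) :
    stA (pre ++ l) = stA l := by
  induction pre with
  | nil => rfl
  | cons x xs ih =>
    simp at h
    have hx : ¬ x = 1 := fun hx => h.1 hx.symm
    simp [stA, hx, ih h.2]

-- the check>0 phase of A's loop computes aux on the remaining suffix
theorem loop_one (suf : List Int) : ∀ (pre : List Int) (p : Int), pre.getLast? = some p →
    solveLoop (pre ++ suf) (PySem.List.pyRange (pre.length) ((pre ++ suf).length) 1) 1 = aux p suf := by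
  induction suf with
  | nil =>
    intro pre p _
    rw [PySem.List.pyRange_one_eq_nil (by simp)]
    rfl
  | cons x xs ih =>
    intro pre p hp
    have hpre : pre ≠ [] := by rintro rfl; simp at hp
    have hlen : (pre.length : Int) < ((pre ++ x :: xs).length : Int) := by
      simp only [List.length_append, List.length_cons]; push_cast; omega
    rw [PySem.List.pyRange_one_cons hlen]
    have hx : PySem.List.pyGet? (pre ++ x :: xs) (pre.length) = some x :=
      PySem.List.pyGet?_append_length pre xs x
    have hprev : PySem.List.pyGet? (pre ++ x :: xs) ((pre.length : Int) - 1) = some p := by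
      have h1 : 1 ≤ pre.length := List.length_pos_iff.mpr hpre
      have hcast : ((pre.length : Int) - 1) = ((pre.length - 1 : Nat) : Int) := by omega
      rw [hcast, PySem.List.pyGet?_natCast]
      rw [List.getElem?_append_left (by omega)]
      rw [← List.getLast?_eq_getElem?]
      exact hp
    rw [solveLoop]
    simp only [hx, hprev]
    by_cases hc : p ≠ 1 ∧ x = 1
    · simp [hc, aux]
    · have step : solveLoop (pre ++ x :: xs)
          (PySem.List.pyRange ((pre.length : Int) + 1) ((pre.length : Int) + ((xs.length : Int) + 1)) 1) 1 = aux x xs := by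
        have h2 := ih (pre ++ [x]) x (by simp)
        simp only [List.append_assoc, List.singleton_append, List.length_append,
          List.length_cons] at h2
        convert h2 using 3 <;> push_cast <;> ring
      by_cases hx1 : x = 1
      · subst hx1
        simp [aux, step]
      · simp [aux, hx1, step]

-- the check=0 phase of A's loop computes stA on the remaining suffix
theorem loop_zero (suf : List Int) : ∀ (pre : List Int),
    solveLoop (pre ++ suf) (PySem.List.pyRange (pre.length) ((pre ++ suf).length) 1) 0 = stA suf := by
  induction suf with
  | nil =>
    intro pre
    rw [PySem.List.pyRange_one_eq_nil (by simp)]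
    rfl
  | cons x xs ih =>
    intro pre
    have hlen : (pre.length : Int) < ((pre ++ x :: xs).length : Int) := by
      simp only [List.length_append, List.length_cons]; push_cast; omega
    rw [PySem.List.pyRange_one_cons hlen]
    have hx : PySem.List.pyGet? (pre ++ x :: xs) (pre.length) = some x :=
      PySem.List.pyGet?_append_length pre xs x
    rw [solveLoop]
    simp only [hx]
    by_cases hx1 : x = 1
    · have step : solveLoop (pre ++ x :: xs)
          (PySem.List.pyRange ((pre.length : Int) + 1) ((pre.length : Int) + ((xs.length : Int) + 1)) 1) 1 = aux x xs := by
        have h2 := loop_one xs (pre ++ [x]) x (by simp)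
        simp only [List.append_assoc, List.singleton_append, List.length_append,
          List.length_cons] at h2
        convert h2 using 3
      subst hx1
      simp [stA, ← aux_one, step]
    · have step : solveLoop (pre ++ x :: xs)
          (PySem.List.pyRange ((pre.length : Int) + 1) ((pre.length : Int) + ((xs.length : Int) + 1)) 1) 0 = stA xs := by
        have h2 := ih (pre ++ [x])
        simp only [List.append_assoc, List.singleton_append, List.length_append,
          List.length_cons] at h2
        convert h2 using 3
      simp [hx1, stA, step]

theorem solve_eq_stA (nums : List Int) : solve nums = stA nums := by
  have := loop_zero nums []
  simpa [solve] using this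

theorem take_count_all (suf : List Int) :
    ((suf.take (suf.count 1)).all (fun x => x == 1)) = stB suf := by
  induction suf with
  | nil => rfl
  | cons x xs ih =>
    by_cases hx : x = 1
    · subst hx
      simp only [List.count_cons_self, List.take_succ_cons, List.all_cons, beq_self_eq_true,
        Bool.true_and, stB]
      exact ih
    · rw [List.count_cons_of_ne hx]
      simp only [stB, if_neg hx]
      by_cases hmem : (1:Int) ∈ xs
      · have hc : 0 < xs.count 1 := List.count_pos_iff.mpr hmem
        obtain ⟨c, hc'⟩ : ∃ c, xs.count 1 = c + 1 := ⟨xs.count 1 - 1, by omega⟩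
        rw [hc', List.take_succ_cons, List.all_cons]
        simp [hx, stC_of_mem xs hmem]
      · rw [List.count_eq_zero.mpr hmem]
        simp [stC_of_not_mem xs hmem]

theorem solve_alt_eq_stA (nums : List Int) : solve_alt nums = stA nums := by
  by_cases hmem : (1:Int) ∈ nums
  · obtain ⟨k, hk⟩ := Option.isSome_iff_exists.mp ((PySem.List.index?_isSome_iff nums 1).mpr hmem)
    obtain ⟨pre, suf, hdecomp, hlen, hnot⟩ := (PySem.List.index?_eq_some_iff nums 1 k).mp hk
    have hc : PySem.List.count nums 1 ≠ 0 := by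
      simpa [PySem.List.count, List.count_eq_zero] using hmem
    unfold solve_alt
    rw [if_neg hc, hk]
    subst hdecomp
    have hcount : PySem.List.count (pre ++ 1 :: suf) 1 = suf.count 1 + 1 := by
      simp [PySem.List.count, List.count_append, List.count_eq_zero.mpr hnot]
    rw [hcount, ← hlen]
    have hslice : PySem.List.slice (pre ++ 1 :: suf) (some (pre.length : Int))
        (some ((pre.length : Int) + ((suf.count 1 + 1 : Nat) : Int))) =
        ((pre ++ 1 :: suf).drop pre.length).take (suf.count 1 + 1) := by
      rw [PySem.List.slice_natCast_add]
    simp only [hslice, List.drop_left]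
    rw [stA_append_of_not_mem pre (1 :: suf) hnot]
    simp only [List.take_succ_cons, List.all_cons, beq_self_eq_true, Bool.true_and]
    rw [take_count_all]
    simp [stA]
  · have hc : PySem.List.count nums 1 = 0 := by
      simpa [PySem.List.count, List.count_eq_zero] using hmem
    unfold solve_alt
    rw [if_pos hc]
    exact (stA_of_not_mem nums hmem).symm

-- ===== VERDICT (by name: the statement is the Claim_ definition above) =====
theorem solve_spec : Claim_equal_solve := by
  intro nums _
  unfold Spec_solve
  rw [solve_eq_stA, solve_alt_eq_stA]
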